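-- pv_equiv track=rewrite | github.com/v-kmx/Wall-Is-You | wall_is_you_main.py | recuperer_int
-- ===== SOURCE A (Python) =====
-- def recuperer_int(chaine):
--     """
--     renvoie le premier chiffre qu'il trouve et l'indice ou il s'est arreter
--     """
--     chiffre=""
--     indice_caractere=0
--     for i in range(len(chaine)):
--         if chaine[indice_caractere].isdigit():
--             while indice_caractere<len(chaine) and chaine[indice_caractere].isdigit():
--                 chiffre+=chaine[indice_caractere]
--                 indice_caractere+=1
--             if indice_caractere==len(chaine)-1:
--                 return int(chiffre),indice_caractere
--             return int(chiffre),indice_caractere+1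
--         else:
--             indice_caractere+=1
--     return None,None
-- ===== SOURCE B (Python) =====
-- def recuperer_int(chaine):
--     """
--     renvoie le premier chiffre qu'il trouve et l'indice ou il s'est arreter
--     """
--     positions = [i for i, c in enumerate(chaine) if c.isdigit()]
--     if not positions:
--         return None, None
--     start = positions[0]
--     end = start
--     while end < len(chaine) and chaine[end].isdigit():
--         end += 1
--     num = int(chaine[start:end])
--     return num, (end if end == len(chaine) - 1 else end + 1)
-- ===== Notes on version B (the rewrite author's own statement) =====
-- stated objective: simpler
-- what changed: Replaces A's fuel-driven outer for-loop with shared mutable index and character-by-character string accumulation by a direct decomposition: a precomputed list of digit positions gives the start, one walk gives the run's end, and the number is int() of the slice; A's end-index convention (end vs end+1 when the run stops at the last index) is reproduced exactly.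
import Mathlib
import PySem

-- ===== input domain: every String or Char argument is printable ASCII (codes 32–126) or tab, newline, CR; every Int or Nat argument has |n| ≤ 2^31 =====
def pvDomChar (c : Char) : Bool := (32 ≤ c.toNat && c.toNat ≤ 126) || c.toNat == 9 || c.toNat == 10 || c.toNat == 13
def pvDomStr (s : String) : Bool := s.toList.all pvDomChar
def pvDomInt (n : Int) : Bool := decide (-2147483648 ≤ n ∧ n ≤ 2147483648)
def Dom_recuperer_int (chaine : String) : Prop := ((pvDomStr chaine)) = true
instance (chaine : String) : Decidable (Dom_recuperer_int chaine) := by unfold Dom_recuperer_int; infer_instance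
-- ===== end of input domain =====

-- B replaces A's fuel-style outer for-loop with shared mutable index by a digit-position
-- list + one end-walk + int() of a slice (same first-number-and-quirky-end-index result; objective: simpler).

-- ===== PORT A =====
-- the inner while loop: accumulates `chiffre` and advances `indice_caractere`
def pvAInner (cs : List Char) (idx : Nat) (chiffre : List Char) : List Char × Nat :=
  if h : idx < cs.length then
    if PySem.Chars.isdigit cs[idx] then pvAInner cs (idx + 1) (chiffre ++ [cs[idx]])
    else (chiffre, idx)
  else (chiffre, idx)
termination_by cs.length - idx

-- the outer `for i in range(len(chaine))` loop; `fuel` counts the remaining iterations,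
-- `idx` is `indice_caractere` (always < len when dereferenced, so getD is exact here)
def pvALoop (cs : List Char) (fuel idx : Nat) : Option Int × Option Int :=
  match fuel with
  | 0 => (none, none)
  | f + 1 =>
    if PySem.Chars.isdigit (cs.getD idx ' ') then
      let r := pvAInner cs idx []
      if r.2 = cs.length - 1 then (PySem.Int.ofChars? r.1, some (r.2 : Int))
      else (PySem.Int.ofChars? r.1, some ((r.2 : Int) + 1))
    else pvALoop cs f (idx + 1)

def recuperer_int (chaine : String) : Option Int × Option Int :=
  pvALoop chaine.toList chaine.toList.length 0

-- ===== PORT B =====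
-- the `while end < len(chaine) and chaine[end].isdigit(): end += 1` walk
def pvBEnd (cs : List Char) (e : Nat) : Nat :=
  if h : e < cs.length then
    if PySem.Chars.isdigit cs[e] then pvBEnd cs (e + 1) else e
  else e
termination_by cs.length - e

def recuperer_int_alt (chaine : String) : Option Int × Option Int :=
  let cs := chaine.toList
  let positions := ((PySem.List.enumerate cs).filter (fun p => PySem.Chars.isdigit p.2)).map Prod.fst
  match positions with
  | [] => (none, none)
  | start :: _ =>
    let s := start.toNat   -- enumerate positions are nonnegative
    let e := pvBEnd cs s
    (PySem.Int.ofChars? (PySem.List.slice cs (some (s : Int)) (some (e : Int))),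
     some (if e = cs.length - 1 then (e : Int) else (e : Int) + 1))

-- ===== PRECONDITION & SPEC =====
def Spec_recuperer_int (chaine : String) (out : Option Int × Option Int) : Prop := out = recuperer_int_alt chaine
instance (chaine : String) (out : Option Int × Option Int) : Decidable (Spec_recuperer_int chaine out) := by unfold Spec_recuperer_int; infer_instance

-- ===== CLAIM (what is proved, stated in full; the proofs are below) =====
def Claim_equal_recuperer_int : Prop := ∀ (chaine : String), Dom_recuperer_int chaine → Spec_recuperer_int chaine (recuperer_int chaine)

-- ===== LEMMAS AND PROOFS =====

theorem le_pvBEnd (cs : List Char) (e : Nat) : e ≤ pvBEnd cs e := by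
  unfold pvBEnd
  split
  · split
    · exact le_trans (Nat.le_succ e) (le_pvBEnd cs (e + 1))
    · exact le_refl e
  · exact le_refl e
termination_by cs.length - e

theorem pvAInner_eq (cs : List Char) : ∀ n idx acc, cs.length - idx = n →
    pvAInner cs idx acc =
      (acc ++ (cs.drop idx).take (pvBEnd cs idx - idx), pvBEnd cs idx) := by
  intro n
  induction n with
  | zero =>
    intro idx acc h
    have hlen : ¬ idx < cs.length := by omega
    rw [pvAInner, pvBEnd]
    simp [hlen, List.drop_eq_nil_of_le (by omega : cs.length ≤ idx)]
  | succ n ih =>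
    intro idx acc h
    rw [pvAInner, pvBEnd]
    by_cases hlen : idx < cs.length
    · simp only [hlen, dif_pos]
      by_cases hd : PySem.Chars.isdigit cs[idx]
      · simp only [hd, if_pos]
        rw [ih (idx + 1) (acc ++ [cs[idx]]) (by omega)]
        have hE : idx + 1 ≤ pvBEnd cs (idx + 1) := le_pvBEnd cs (idx + 1)
        have hdrop : cs.drop idx = cs[idx] :: cs.drop (idx + 1) :=
          List.drop_eq_getElem_cons hlen
        have heq : pvBEnd cs (idx + 1) - idx = (pvBEnd cs (idx + 1) - (idx + 1)) + 1 := by omega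
        rw [hdrop, heq, List.take_succ_cons]
        simp
      · simp [hd]
    · simp [hlen]

-- the first element of B's `positions` list is the first digit index ≥ any prefix of non-digits
theorem positions_of_nodigit_prefix (cs : List Char) (idx : Nat) (hlen : idx ≤ cs.length)
    (hnd : ∀ j (h : j < cs.length), j < idx → PySem.Chars.isdigit cs[j] = false) :
    ((PySem.List.enumerate cs).filter (fun p => PySem.Chars.isdigit p.2)).map Prod.fst =
      ((PySem.List.enumerate (cs.drop idx) (idx : Int)).filter (fun p => PySem.Chars.isdigit p.2)).map Prod.fst := by
  conv_lhs => rw [← List.take_append_drop idx cs]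
  rw [PySem.List.enumerate_append, List.filter_append]
  have h1 : ((PySem.List.enumerate (cs.take idx) 0).filter (fun p => PySem.Chars.isdigit p.2)) = [] := by
    rw [List.filter_eq_nil_iff]
    intro p hp
    rcases (PySem.List.mem_enumerate_iff _ _ _).1 hp with ⟨k, hk, rfl⟩
    simp only
    have hk' : k < idx := by
      have := hk; simp at this; omega
    have hkc : k < cs.length := lt_of_lt_of_le hk' hlen
    have := hnd k hkc hk'
    simp only [List.getElem_take] at *
    simp [this]
  rw [h1]
  simp [List.length_take, Nat.min_eq_left hlen]

theorem pvALoop_eq (cs : List Char) : ∀ fuel idx, idx + fuel = cs.length →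
    (∀ j (h : j < cs.length), j < idx → PySem.Chars.isdigit cs[j] = false) →
    pvALoop cs fuel idx =
      (match ((PySem.List.enumerate cs).filter (fun p => PySem.Chars.isdigit p.2)).map Prod.fst with
       | [] => (none, none)
       | start :: _ =>
         let s := start.toNat
         let e := pvBEnd cs s
         (PySem.Int.ofChars? (PySem.List.slice cs (some (s : Int)) (some (e : Int))),
          some (if e = cs.length - 1 then (e : Int) else (e : Int) + 1))) := by
  intro fuel
  induction fuel with
  | zero =>
    intro idx h hnd
    rw [positions_of_nodigit_prefix cs idx (by omega) hnd]
    simp only [Nat.add_zero] at h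
    rw [h]
    simp [pvALoop, PySem.List.enumerate_nil]
  | succ f ih =>
    intro idx h hnd
    have hlen : idx < cs.length := by omega
    rw [pvALoop]
    by_cases hd : PySem.Chars.isdigit cs[idx]
    · have hget : cs.getD idx ' ' = cs[idx] := List.getD_eq_getElem cs ' ' hlen
      rw [positions_of_nodigit_prefix cs idx (by omega) hnd]
      have hdrop : cs.drop idx = cs[idx] :: cs.drop (idx + 1) :=
        List.drop_eq_getElem_cons hlen
      rw [hdrop, PySem.List.enumerate_cons]
      simp only [hget, hd, if_pos, List.filter_cons, List.map_cons]
      have hs : ((idx : Int)).toNat = idx := Int.toNat_natCast idx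
      rw [pvAInner_eq cs (cs.length - idx) idx [] rfl]
      have hsl : PySem.List.slice cs (some ((idx : Int))) (some ((pvBEnd cs idx : Nat) : Int)) =
          (cs.drop idx).take (pvBEnd cs idx - idx) := PySem.List.slice_natCast cs idx (pvBEnd cs idx)
      simp only [hs, hsl]
      by_cases he : pvBEnd cs idx = cs.length - 1 <;> simp [he]
    · have hget : cs.getD idx ' ' = cs[idx] := List.getD_eq_getElem cs ' ' hlen
      rw [hget]
      simp only [hd, if_neg, Bool.false_eq_true, not_false_iff]
      exact ih (idx + 1) (by omega) (by
        intro j hj hji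
        by_cases hji' : j < idx
        · exact hnd j hj hji'
        · have : j = idx := by omega
          subst this
          simpa using hd)

-- ===== VERDICT (by name: the statement is the Claim_ definition above) =====
theorem recuperer_int_spec : Claim_equal_recuperer_int := by
  intro chaine _
  unfold Spec_recuperer_int recuperer_int recuperer_int_alt
  exact pvALoop_eq chaine.toList chaine.toList.length 0 (by omega) (by intro j hj hji; omega)
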